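-- pv_equiv track=rewrite | github.com/NobuyukiInoue/LeetCode | Problems/2400_2499/2432_The_Employee_That_Worked_on_the_Longest_Task/Project_Python3/The_Employee_That_Worked_on_the_Longest_Task.py | hardestWorker2
-- ===== SOURCE A (Python) =====
-- from typing import List, Dict, Tuple
--
-- def hardestWorker2(n: int, logs: List[List[int]]) -> int:
--     # 309ms - 828ms
--     best_id = best_time = start = 0
--     for emp_id, end in logs:
--         time = end - start
--         if time > best_time or (time == best_time and best_id > emp_id):
--             best_id = emp_id
--             best_time = time
--         start = end
--     return best_id
-- ===== SOURCE B (Python) =====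
-- def hardestWorker2(n, logs):
--     # sort-based selection: build candidate tuples (-duration, emp_id), seed with the
--     # phantom (0, 0), sort lexicographically and take the first tuple's id
--     ends = [end for _, end in logs]
--     cands = [(0, 0)] + [(prev - end, emp) for (emp, end), prev in zip(logs, [0] + ends)]
--     cands.sort()
--     return cands[0][1]
-- ===== Notes on version B (the rewrite author's own statement) =====
-- stated objective: alternative
-- what changed: A's single-pass running-best accumulator is replaced by sort-based selection: build candidate tuples (-duration, emp_id) seeded with the phantom (0,0), sort them lexicographically, and return the id of the first tuple.
import Mathlib
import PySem

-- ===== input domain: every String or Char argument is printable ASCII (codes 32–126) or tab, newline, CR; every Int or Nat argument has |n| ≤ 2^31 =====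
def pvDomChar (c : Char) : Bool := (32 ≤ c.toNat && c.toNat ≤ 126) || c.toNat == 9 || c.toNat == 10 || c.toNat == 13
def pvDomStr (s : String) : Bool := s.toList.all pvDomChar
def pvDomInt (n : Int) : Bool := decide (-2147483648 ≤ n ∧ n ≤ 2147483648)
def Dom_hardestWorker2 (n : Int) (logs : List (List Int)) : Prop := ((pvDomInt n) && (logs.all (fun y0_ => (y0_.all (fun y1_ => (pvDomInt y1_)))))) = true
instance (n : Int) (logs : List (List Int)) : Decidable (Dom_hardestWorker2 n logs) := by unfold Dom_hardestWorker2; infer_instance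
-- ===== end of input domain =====

-- B replaces A's running-best accumulator loop by sort-based selection over seeded (-duration, id) tuples; objective: alternative (not faster).


-- ===== PORT A =====
-- step of A's loop; state = (best_id, best_time, start); on a log that is not a 2-list Python raises (excluded by Pre_)
def pvStepA (st : Int × Int × Int) (log : List Int) : Int × Int × Int :=
  match log with
  | e :: en :: _ =>
    let t := en - st.2.2
    if t > st.2.1 ∨ (t = st.2.1 ∧ st.1 > e) then (e, t, en) else (st.1, st.2.1, en)
  | _ => st

def hardestWorker2 (n : Int) (logs : List (List Int)) : Int :=
  (logs.foldl pvStepA (0, 0, 0)).1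

-- ===== PORT B =====
-- tuple unpacking 'emp_id, end' of a 2-list (logs outside Pre_ raise in Python; defaults here)
def pvFst2 (l : List Int) : Int := match l with | e :: _ => e | _ => 0
def pvSnd2 (l : List Int) : Int := match l with | _ :: en :: _ => en | _ => 0

-- Python sorts the tuples themselves, i.e. lexicographically: key = toLex is exact for 2-tuples of ints
def hardestWorker2_alt (n : Int) (logs : List (List Int)) : Int :=
  let ends := logs.map pvSnd2
  let cands := (0, 0) :: (logs.zip (0 :: ends)).map
      (fun p => (p.2 - pvSnd2 p.1, pvFst2 p.1))
  ((PySem.List.sorted cands (fun t : Int × Int => toLex t)).headD (0, 0)).2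

-- ===== PRECONDITION & SPEC =====
-- Pre_ excludes logs containing an entry that is not a 2-element list: there Python's
-- 'emp_id, end' tuple unpacking raises ValueError.
def Pre_hardestWorker2 (n : Int) (logs : List (List Int)) : Prop :=
  ∀ l ∈ logs, l.length = 2
instance (n : Int) (logs : List (List Int)) : Decidable (Pre_hardestWorker2 n logs) := by unfold Pre_hardestWorker2; infer_instance
def pvWitness_hardestWorker2 : Int × List (List Int) := (10, [[1, 3], [2, 5], [0, 9]])

def Spec_hardestWorker2 (n : Int) (logs : List (List Int)) (out : Int) : Prop := out = hardestWorker2_alt n logs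
instance (n : Int) (logs : List (List Int)) (out : Int) : Decidable (Spec_hardestWorker2 n logs out) := by unfold Spec_hardestWorker2; infer_instance

-- ===== CLAIM (what is proved, stated in full; the proofs are below) =====
def Claim_equal_hardestWorker2 : Prop := ∀ (n : Int) (logs : List (List Int)), Dom_hardestWorker2 n logs → Pre_hardestWorker2 n logs → Spec_hardestWorker2 n logs (hardestWorker2 n logs)

-- ===== LEMMAS AND PROOFS =====
-- the candidate table, written structurally (equal to B's zip+map form, lemma pvZipCands)
def pvCands (prev : Int) (logs : List (List Int)) : List (Int × Int) :=
  match logs with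
  | [] => []
  | l :: rest => (prev - pvSnd2 l, pvFst2 l) :: pvCands (pvSnd2 l) rest

theorem pvZipCands (logs : List (List Int)) : ∀ prev : Int,
    (logs.zip (prev :: logs.map pvSnd2)).map (fun p => (p.2 - pvSnd2 p.1, pvFst2 p.1))
      = pvCands prev logs := by
  induction logs with
  | nil => intro prev; rfl
  | cons l rest ih => intro prev; simp only [List.map_cons, List.zip_cons_cons, pvCands, ih]

-- first-lex-minimum fold
def pvMinStep (b c : Int × Int) : Int × Int := if toLex c < toLex b then c else b

theorem pvFoldMinSpec (xs : List (Int × Int)) : ∀ a : Int × Int,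
    xs.foldl pvMinStep a ∈ a :: xs ∧ ∀ y ∈ a :: xs, toLex (xs.foldl pvMinStep a) ≤ toLex y := by
  induction xs with
  | nil =>
    intro a
    exact ⟨List.mem_cons_self .., by intro y hy; simp at hy; simp [hy]⟩
  | cons x xs ih =>
    intro a
    have h := ih (pvMinStep a x)
    constructor
    · rcases List.mem_cons.mp h.1 with h1 | h1
      · rw [List.foldl_cons, h1]; unfold pvMinStep; split <;> simp
      · simp only [List.foldl_cons]; exact List.mem_cons_of_mem _ (List.mem_cons_of_mem _ h1)
    · intro y hy
      have hax : toLex (pvMinStep a x) ≤ toLex a ∧ toLex (pvMinStep a x) ≤ toLex x := by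
        unfold pvMinStep; split <;> simp_all [le_of_lt]
      rcases List.mem_cons.mp hy with rfl | hy'
      · exact le_trans (h.2 _ (List.mem_cons_self ..)) hax.1
      rcases List.mem_cons.mp hy' with rfl | hy'' 
      · exact le_trans (h.2 _ (List.mem_cons_self ..)) hax.2
      · exact h.2 _ (List.mem_cons_of_mem _ hy'')

-- head of the stable sort by toLex equals the fold of pvMinStep (both are THE lex-minimum value)
theorem pvHeadSorted (a : Int × Int) (xs : List (Int × Int)) :
    (PySem.List.sorted (a :: xs) (fun t : Int × Int => toLex t)).headD (0, 0)
      = xs.foldl pvMinStep a := by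
  have hne : PySem.List.sorted (a :: xs) (fun t : Int × Int => toLex t) ≠ [] := by
    simp [PySem.List.sorted_eq_nil_iff]
  obtain ⟨m, t, hmt⟩ := List.exists_cons_of_ne_nil hne
  have hmin := pvFoldMinSpec xs a
  have hmem : m ∈ a :: xs := by
    rw [← PySem.List.mem_sorted (key := fun t : Int × Int => toLex t) (rev := false)]
    rw [hmt]; exact List.mem_cons_self ..
  have h1 : toLex m ≤ toLex (xs.foldl pvMinStep a) := by
    exact PySem.List.key_head_sorted_le (a :: xs) _ hmt _ hmin.1
  have h2 : toLex (xs.foldl pvMinStep a) ≤ toLex m := hmin.2 _ hmem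
  have : toLex m = toLex (xs.foldl pvMinStep a) := le_antisymm h1 h2
  have := toLex.injective this
  rw [hmt, List.headD_cons, this]

-- loop correspondence: A's fold from state (bi, bt, s) is the pvMinStep fold over the
-- candidate table built from prev = s, started at (-bt, bi)
theorem pvFoldCorr (logs : List (List Int)) (h : ∀ l ∈ logs, l.length = 2) :
    ∀ bi bt s : Int,
      (logs.foldl pvStepA (bi, bt, s)).1 = ((pvCands s logs).foldl pvMinStep (-bt, bi)).2 := by
  induction logs with
  | nil => intro bi bt s; rfl
  | cons log rest ih =>
    intro bi bt s
    have hlen : log.length = 2 := h log (List.mem_cons_self ..)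
    obtain ⟨e, en, rfl⟩ : ∃ e en, log = [e, en] := by
      match log, hlen with
      | [a, b], _ => exact ⟨a, b, rfl⟩
    have hrest : ∀ l ∈ rest, l.length = 2 := fun l hl => h l (List.mem_cons_of_mem _ hl)
    simp only [List.foldl_cons, pvCands, pvStepA, pvMinStep, pvFst2, pvSnd2]
    have hlex : (toLex (s - en, e) < toLex (-bt, bi)) ↔
        (en - s > bt ∨ (en - s = bt ∧ bi > e)) := by
      rw [Prod.Lex.toLex_lt_toLex]; omega
    by_cases hc : en - s > bt ∨ (en - s = bt ∧ bi > e)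
    · rw [if_pos hc, if_pos (hlex.mpr hc)]
      have := ih hrest e (en - s) en
      simpa using this
    · rw [if_neg hc, if_neg (fun hx => hc (hlex.mp hx))]
      exact ih hrest bi bt en

-- ===== VERDICT (by name: the statement is the Claim_ definition above) =====
theorem hardestWorker2_spec : Claim_equal_hardestWorker2 := by
  intro n logs _ hpre
  unfold Spec_hardestWorker2 hardestWorker2 hardestWorker2_alt
  simp only [pvZipCands, pvHeadSorted]
  have := pvFoldCorr logs hpre 0 0 0
  simpa using this
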